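-- pv_equiv track=rewrite | github.com/SixingChen028/some_and_done | modules/utils_exp.py | segment_lengths
-- ===== SOURCE A (Python) =====
-- def segment_lengths(lst, start_element):
--     segments = []
--     counts = []
--     current_segment = []
--
--     for num in lst:
--         if num == start_element:
--             if current_segment:
--                 segments.append(current_segment)
--                 counts.append(len(current_segment) - 1)  # Exclude start element
--             current_segment = [num]
--         else:
--             current_segment.append(num)
--
--     if current_segment:
--         segments.append(current_segment)
--         counts.append(len(current_segment) - 1)  # Exclude start element
--
--     return counts
-- ===== SOURCE B (Python) =====
-- def segment_lengths(lst, start_element):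
--     positions = [i for i, x in enumerate(lst) if x == start_element]
--     if not positions:
--         return [len(lst) - 1] if lst else []
--     counts = []
--     if positions[0] > 0:
--         counts.append(positions[0] - 1)
--     for p, q in zip(positions, positions[1:]):
--         counts.append(q - p - 1)
--     counts.append(len(lst) - positions[-1] - 1)
--     return counts
-- ===== Notes on version B (the rewrite author's own statement) =====
-- stated objective: alternative
-- what changed: B computes delimiter index positions once and derives each segment length from index differences (positions[j+1]-positions[j]-1, plus leading/trailing arithmetic), instead of A's accumulation of explicit segment lists and taking their lengths.
import Mathlib
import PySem

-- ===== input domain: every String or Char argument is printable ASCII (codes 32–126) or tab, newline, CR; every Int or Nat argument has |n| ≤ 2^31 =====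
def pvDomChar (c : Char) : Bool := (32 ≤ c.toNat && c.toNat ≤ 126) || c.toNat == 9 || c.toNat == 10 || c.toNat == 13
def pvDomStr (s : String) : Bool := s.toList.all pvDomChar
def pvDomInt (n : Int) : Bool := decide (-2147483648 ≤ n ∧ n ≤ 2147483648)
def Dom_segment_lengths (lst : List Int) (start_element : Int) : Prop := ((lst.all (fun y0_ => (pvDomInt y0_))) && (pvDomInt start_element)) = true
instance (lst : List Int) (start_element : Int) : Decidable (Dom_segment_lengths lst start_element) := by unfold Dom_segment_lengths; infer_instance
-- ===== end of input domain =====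

-- B derives segment lengths from differences of delimiter positions instead of
-- accumulating explicit segment lists as A does (alternative decomposition, same cost).

-- ===== PORT A =====
-- state: (segments, counts, current_segment), exactly A's three accumulators
def segment_lengths (lst : List Int) (start_element : Int) : List Int :=
  let st := lst.foldl
    (fun (st : List (List Int) × List Int × List Int) num =>
      let segments := st.1
      let counts := st.2.1
      let current_segment := st.2.2
      if num == start_element then
        if current_segment ≠ [] then
          (segments ++ [current_segment],
           counts ++ [(current_segment.length : Int) - 1],
           [num])
        else
          (segments, counts, [num])
      else
        (segments, counts, current_segment ++ [num]))
    ([], [], [])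
  if st.2.2 ≠ [] then
    st.2.1 ++ [((st.2.2).length : Int) - 1]
  else
    st.2.1

-- ===== PORT B =====
def segment_lengths_alt (lst : List Int) (start_element : Int) : List Int :=
  let positions :=
    ((PySem.List.enumerate lst).filter (fun p => p.2 == start_element)).map (fun p => p.1)
  match positions with
  | [] => if lst ≠ [] then [(lst.length : Int) - 1] else []
  | p0 :: _ =>
    let lead := if p0 > 0 then [p0 - 1] else []
    let mids := (positions.zip positions.tail).map (fun pq => pq.2 - pq.1 - 1)
    lead ++ mids ++ [(lst.length : Int) - positions.getLastD 0 - 1]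

-- ===== PRECONDITION & SPEC =====
def Spec_segment_lengths (lst : List Int) (start_element : Int) (out : List Int) : Prop := out = segment_lengths_alt lst start_element
instance (lst : List Int) (start_element : Int) (out : List Int) : Decidable (Spec_segment_lengths lst start_element out) := by unfold Spec_segment_lengths; infer_instance

-- ===== CLAIM (what is proved, stated in full; the proofs are below) =====
def Claim_equal_segment_lengths : Prop := ∀ (lst : List Int) (start_element : Int), Dom_segment_lengths lst start_element → Spec_segment_lengths lst start_element (segment_lengths lst start_element)

-- ===== LEMMAS AND PROOFS =====

-- A's loop body and final flush, as named functions (definitionally A's code)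
def stepA (start_element : Int) (st : List (List Int) × List Int × List Int) (num : Int) :
    List (List Int) × List Int × List Int :=
  let segments := st.1
  let counts := st.2.1
  let current_segment := st.2.2
  if num == start_element then
    if current_segment ≠ [] then
      (segments ++ [current_segment],
       counts ++ [(current_segment.length : Int) - 1],
       [num])
    else
      (segments, counts, [num])
  else
    (segments, counts, current_segment ++ [num])

def flushA (st : List (List Int) × List Int × List Int) : List Int :=
  if st.2.2 ≠ [] then st.2.1 ++ [((st.2.2).length : Int) - 1] else st.2.1

-- the counts A emits, tracking only the current segment's length
def runA (s : Int) : List Int → Int → List Int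
  | [], L => [L - 1]
  | x :: xs, L => if x == s then (L - 1) :: runA s xs 1 else runA s xs (L + 1)

-- 0-based positions of the delimiter
def posL (s : Int) : List Int → List Int
  | [] => []
  | x :: xs => if x == s then 0 :: (posL s xs).map (· + 1) else (posL s xs).map (· + 1)

def midsL (pos : List Int) : List Int :=
  (pos.zip pos.tail).map (fun pq => pq.2 - pq.1 - 1)

-- B's answer as a function of the positions list, list length n and current offset L
def Bspec (pos : List Int) (n L : Int) : List Int :=
  match pos with
  | [] => [L + n - 1]
  | p :: _ => (L + p - 1) :: (midsL pos ++ [n - pos.getLastD 0 - 1])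

theorem A_as_flush (lst : List Int) (s : Int) :
    segment_lengths lst s = flushA (lst.foldl (stepA s) ([], [], [])) := rfl

theorem foldA_run (s : Int) (xs : List Int) :
    ∀ (segs : List (List Int)) (counts cs : List Int), cs ≠ [] →
      flushA (xs.foldl (stepA s) (segs, counts, cs)) = counts ++ runA s xs (cs.length : Int) := by
  induction xs with
  | nil =>
    intro segs counts cs h
    simp [flushA, runA, h]
  | cons x xs ih =>
    intro segs counts cs h
    rw [List.foldl_cons]
    by_cases hx : x == s
    · have hstep : stepA s (segs, counts, cs) x
          = (segs ++ [cs], counts ++ [(cs.length : Int) - 1], [x]) := by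
        simp [stepA, hx, h]
      rw [hstep, ih _ _ [x] (by simp)]
      simp [runA, hx]
    · have hstep : stepA s (segs, counts, cs) x = (segs, counts, cs ++ [x]) := by
        simp [stepA, hx]
      rw [hstep, ih _ _ (cs ++ [x]) (by simp)]
      have hlen : ((cs ++ [x]).length : Int) = (cs.length : Int) + 1 := by
        simp
      rw [hlen]
      simp [runA, hx]

theorem A_char (s : Int) (x : Int) (xs : List Int) :
    segment_lengths (x :: xs) s = runA s xs 1 := by
  rw [A_as_flush]
  have h1 : (x :: xs).foldl (stepA s) ([], [], []) = xs.foldl (stepA s) ([], [], [x]) := by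
    by_cases hx : x == s <;> simp [stepA, hx]
  rw [h1, foldA_run s xs [] [] [x] (by simp)]
  simp

theorem midsL_cons2 (a b : Int) (t : List Int) :
    midsL (a :: b :: t) = (b - a - 1) :: midsL (b :: t) := rfl

theorem midsL_shift (q : Int) (r : List Int) :
    midsL ((q + 1) :: r.map (· + 1)) = midsL (q :: r) := by
  induction r generalizing q with
  | nil => rfl
  | cons b t ih =>
    simp only [List.map_cons]
    rw [midsL_cons2, ih b, midsL_cons2]
    norm_num

theorem getLastD_shift (q : Int) (r : List Int) :
    (r.map (· + 1)).getLastD (q + 1) = r.getLastD q + 1 := by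
  induction r generalizing q with
  | nil => rfl
  | cons b t ih =>
    simp only [List.map_cons, List.getLastD_cons]
    exact ih b

theorem posL_nonneg (s : Int) (xs : List Int) : ∀ p ∈ posL s xs, 0 ≤ p := by
  induction xs with
  | nil => intro p hp; simp [posL] at hp
  | cons x t ih =>
    intro p hp
    by_cases hx : x == s <;> simp [posL, hx] at hp
    · rcases hp with h0 | ⟨q, hq, rfl⟩
      · omega
      · have := ih q hq; omega
    · rcases hp with ⟨q, hq, rfl⟩
      have := ih q hq; omega

theorem runA_Bspec (s : Int) (xs : List Int) :
    ∀ L : Int, runA s xs L = Bspec (posL s xs) (xs.length : Int) L := by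
  induction xs with
  | nil => intro L; simp [runA, posL, Bspec]
  | cons x xs ih =>
    intro L
    by_cases hx : x == s
    · rw [show runA s (x :: xs) L = (L - 1) :: runA s xs 1 from by simp [runA, hx], ih 1]
      rcases hq : posL s xs with _ | ⟨q, r⟩
      · have hp : posL s (x :: xs) = [0] := by simp [posL, hx, hq]
        rw [hp]
        simp [Bspec, midsL]
      · have hp : posL s (x :: xs) = 0 :: (q + 1) :: r.map (· + 1) := by
          simp [posL, hx, hq]
        rw [hp]
        simp only [Bspec, midsL_cons2, midsL_shift, List.getLastD_cons, getLastD_shift,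
          List.length_cons, List.cons.injEq]
        push_cast
        simp only [List.cons_append, List.singleton_append, List.nil_append, List.cons.injEq,
          List.append_right_inj, and_true]
        omega
    · rw [show runA s (x :: xs) L = runA s xs (L + 1) from by simp [runA, hx], ih (L + 1)]
      rcases hq : posL s xs with _ | ⟨q, r⟩
      · have hp : posL s (x :: xs) = [] := by simp [posL, hx, hq]
        rw [hp]
        simp [Bspec]
        ring
      · have hp : posL s (x :: xs) = (q + 1) :: r.map (· + 1) := by
          simp [posL, hx, hq]
        rw [hp]
        simp only [Bspec, midsL_shift, List.getLastD_cons, getLastD_shift, List.length_cons,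
          List.cons.injEq]
        push_cast
        simp only [List.cons_append, List.singleton_append, List.nil_append, List.cons.injEq,
          List.append_right_inj, and_true]
        omega

-- B port's positions list equals posL
theorem positions_eq (s : Int) (lst : List Int) : ∀ k : Int,
    ((PySem.List.enumerate lst k).filter (fun p => p.2 == s)).map (fun p => p.1)
      = (posL s lst).map (· + k) := by
  induction lst with
  | nil => intro k; simp [PySem.List.enumerate_nil, posL]
  | cons x xs ih =>
    intro k
    rw [PySem.List.enumerate_cons]
    by_cases hx : x == s
    · simp only [List.filter_cons, hx, if_pos, List.map_cons, posL, ih (k + 1),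
        List.map_map]
      congr 1
      · omega
      · apply List.map_congr_left
        intro a _
        simp
        ring
    · simp only [List.filter_cons, hx, Bool.false_eq_true, if_false, posL, ih (k + 1),
        List.map_map]
      apply List.map_congr_left
      intro a _
      simp
      ring

theorem positions_zero (s : Int) (lst : List Int) :
    ((PySem.List.enumerate lst 0).filter (fun p => p.2 == s)).map (fun p => p.1)
      = posL s lst := by
  rw [positions_eq s lst 0]
  simp

-- B's result as a function of the positions list
def altSpec (pos : List Int) (lst : List Int) : List Int :=
  match pos with
  | [] => if lst ≠ [] then [(lst.length : Int) - 1] else []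
  | p0 :: _ =>
    (if p0 > 0 then [p0 - 1] else []) ++ midsL pos ++ [(lst.length : Int) - pos.getLastD 0 - 1]

theorem alt_char (lst : List Int) (s : Int) :
    segment_lengths_alt lst s = altSpec (posL s lst) lst := by
  unfold segment_lengths_alt
  rw [positions_zero]
  rcases h : posL s lst with _ | ⟨p0, rest⟩ <;> simp [altSpec, midsL]

-- ===== VERDICT (by name: the statement is the Claim_ definition above) =====
theorem segment_lengths_spec : Claim_equal_segment_lengths := by
  intro lst s _
  unfold Spec_segment_lengths
  cases lst with
  | nil => rfl
  | cons x xs =>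
    rw [A_char, runA_Bspec s xs 1, alt_char]
    by_cases hx : x == s
    · rcases hq : posL s xs with _ | ⟨q, r⟩
      · have hp : posL s (x :: xs) = [0] := by simp [posL, hx, hq]
        rw [hp]
        simp [Bspec, altSpec, midsL]
      · have hp : posL s (x :: xs) = 0 :: (q + 1) :: r.map (· + 1) := by
          simp [posL, hx, hq]
        rw [hp]
        simp only [Bspec, altSpec, midsL_cons2, midsL_shift, List.getLastD_cons,
          getLastD_shift, List.length_cons, gt_iff_lt, lt_self_iff_false, if_false,
          List.nil_append]
        push_cast
        simp only [List.cons_append, List.singleton_append, List.nil_append, List.cons.injEq,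
          List.append_right_inj, and_true]
        omega
    · rcases hq : posL s xs with _ | ⟨q, r⟩
      · have hp : posL s (x :: xs) = [] := by simp [posL, hx, hq]
        rw [hp]
        simp [Bspec, altSpec]
      · have hp : posL s (x :: xs) = (q + 1) :: r.map (· + 1) := by
          simp [posL, hx, hq]
        have hq0 : 0 ≤ q := posL_nonneg s xs q (by rw [hq]; simp)
        rw [hp]
        simp only [Bspec, altSpec, midsL_shift, List.getLastD_cons, getLastD_shift,
          List.length_cons, gt_iff_lt]
        rw [if_pos (by omega : (0:Int) < q + 1)]
        push_cast
        simp only [List.cons_append, List.singleton_append, List.nil_append, List.cons.injEq,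
          List.append_right_inj, and_true]
        omega
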